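-- pv_equiv track=rewrite | github.com/AlessandroGiulivo/prog2 | Exam 2/X86108_en/words_2.py | words_2
-- ===== SOURCE A (Python) =====
-- def words_2(n, A):
--     A.sort()
--     if n == 0:
--         return [""]
--     else:
--         L = words_2(n - 1, A)
--         L1 = []
--         for e in L:
--             for c in A:
--                 L1.append(e + c)
--         return L1
-- ===== SOURCE B (Python) =====
-- def words_2(n, A):
--     A.sort()
--     result = [""]
--     for _ in range(n):
--         result = [e + c for e in result for c in A]
--     return result
-- ===== Notes on version B (the rewrite author's own statement) =====
-- stated objective: simpler
-- what changed: Replaces the recursion (which re-sorts A at every level) with a single in-place sort followed by an iterative product loop that extends every word by one character n times.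
import Mathlib
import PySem

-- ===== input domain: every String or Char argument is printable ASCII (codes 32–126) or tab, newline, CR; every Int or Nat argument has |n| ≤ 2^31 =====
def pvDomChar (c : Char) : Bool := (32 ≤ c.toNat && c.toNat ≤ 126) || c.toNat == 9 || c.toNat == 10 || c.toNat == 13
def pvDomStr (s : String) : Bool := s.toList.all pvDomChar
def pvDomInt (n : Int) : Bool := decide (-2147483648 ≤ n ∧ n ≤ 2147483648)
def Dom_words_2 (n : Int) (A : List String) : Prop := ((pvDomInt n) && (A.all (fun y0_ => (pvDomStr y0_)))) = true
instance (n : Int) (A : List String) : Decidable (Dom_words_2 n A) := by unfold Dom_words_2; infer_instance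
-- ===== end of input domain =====

-- B replaces the recursion (re-sorting A each level) by one sort plus an iterative product
-- loop ('simpler'); both Pythons sort A in place — the equivalence proved is about the return value
-- (the mutation of A is identical in A and B).

-- ===== PORT A =====
-- A's recursion counts n down to 0; it is modelled on n.toNat (Pre_ restricts to 0 ≤ n,
-- where the two coincide; for n < 0 the Python infinitely recurses).
def wordsRecA : Nat → List String → List String
  | k, A0 =>
    let A := PySem.List.sorted A0 (fun x => x) false   -- A.sort() (each call re-sorts)
    match k with
    | 0 => [""]
    | k + 1 =>
      let L := wordsRecA k A
      L.foldl (fun L1 e => A.foldl (fun L1 c => L1 ++ [e ++ c]) L1) []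

def words_2 (n : Int) (A : List String) : List String :=
  wordsRecA n.toNat A

-- ===== PORT B =====
def words_2_alt (n : Int) (A : List String) : List String :=
  let As := PySem.List.sorted A (fun x => x) false     -- A.sort(), once
  (List.range n.toNat).foldl
    (fun result _ => result.flatMap (fun e => As.map (fun c => e ++ c))) [""]

-- ===== PRECONDITION & SPEC =====
-- Pre_ excludes n < 0, on which the Python A recurses forever (RecursionError).
def Pre_words_2 (n : Int) (A : List String) : Prop := 0 ≤ n
instance (n : Int) (A : List String) : Decidable (Pre_words_2 n A) := by unfold Pre_words_2; infer_instance
def pvWitness_words_2 : Int × List String := (2, ["b", "a"])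

def Spec_words_2 (n : Int) (A : List String) (out : List String) : Prop := out = words_2_alt n A
instance (n : Int) (A : List String) (out : List String) : Decidable (Spec_words_2 n A out) := by unfold Spec_words_2; infer_instance

-- ===== CLAIM =====
def Claim_equal_words_2 : Prop := ∀ (n : Int) (A : List String), Dom_words_2 n A → Pre_words_2 n A → Spec_words_2 n A (words_2 n A)

-- ===== LEMMAS AND PROOFS =====

-- A's one recursion step, after collapsing its two appending loops to flatMap/map.
theorem wordsRecA_succ (k : Nat) (A0 : List String) :
    wordsRecA (k + 1) A0 =
      (wordsRecA k (PySem.List.sorted A0 (fun x => x) false)).flatMap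
        (fun e => (PySem.List.sorted A0 (fun x => x) false).map (fun c => e ++ c)) := by
  rw [wordsRecA]
  simp only [PySem.List.foldl_append_singleton_eq_map, PySem.List.foldl_append_eq_flatMap,
    List.nil_append, List.flatMap_def]

theorem wordsRecA_eq_iter (k : Nat) (A0 : List String) :
    wordsRecA k A0 =
      (List.range k).foldl
        (fun result _ =>
          result.flatMap (fun e => (PySem.List.sorted A0 (fun x => x) false).map (fun c => e ++ c)))
        [""] := by
  induction k generalizing A0 with
  | zero => rw [wordsRecA]; rfl
  | succ k ih =>
    rw [wordsRecA_succ, ih, PySem.List.sorted_sorted, List.range_succ, List.foldl_append]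
    rfl

-- ===== VERDICT =====
theorem words_2_spec : Claim_equal_words_2 := by
  intro n A _ _
  unfold Spec_words_2 words_2 words_2_alt
  exact wordsRecA_eq_iter n.toNat A
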